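-- pv_equiv track=rewrite | github.com/DavranDev/CogniSchedule | research/experiments/paper_improvement_eval.py | _daily_context
-- ===== SOURCE A (Python) =====
-- from typing import Any
--
-- def _daily_context(actionable: list[dict[str, Any]]) -> dict[str, dict[str, int]]:
--     by_day: dict[str, list[dict[str, Any]]] = {}
--     for b in actionable:
--         by_day.setdefault(str(b["day"]).lower(), []).append(b)
--
--     out: dict[str, dict[str, int]] = {}
--     for day, blocks in by_day.items():
--         distinct_courses = len({b.get("course") for b in blocks if b.get("course")})
--         out[day] = {"count": len(blocks), "distinct_courses": distinct_courses}
--     return out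
-- ===== SOURCE B (Python) =====
-- def _daily_context(actionable):
--     # One streaming pass: per day keep (running count, set of truthy courses);
--     # no intermediate list of blocks, no second grouping scan.
--     agg = {}
--     for b in actionable:
--         day = str(b["day"]).lower()
--         n, s = agg.get(day, (0, set()))
--         c = b.get("course")
--         if c:
--             s.add(c)
--         agg[day] = (n + 1, s)
--     return {day: {"count": n, "distinct_courses": len(s)} for day, (n, s) in agg.items()}
-- ===== Notes on version B (the rewrite author's own statement) =====
-- stated objective: alternative
-- what changed: B replaces A's two-phase group-then-summarise (build per-day lists of blocks, then re-scan each group to count and build its course set) with a single streaming pass that maintains per day a running count and an incrementally built course set, so no intermediate block lists exist.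
import Mathlib
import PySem

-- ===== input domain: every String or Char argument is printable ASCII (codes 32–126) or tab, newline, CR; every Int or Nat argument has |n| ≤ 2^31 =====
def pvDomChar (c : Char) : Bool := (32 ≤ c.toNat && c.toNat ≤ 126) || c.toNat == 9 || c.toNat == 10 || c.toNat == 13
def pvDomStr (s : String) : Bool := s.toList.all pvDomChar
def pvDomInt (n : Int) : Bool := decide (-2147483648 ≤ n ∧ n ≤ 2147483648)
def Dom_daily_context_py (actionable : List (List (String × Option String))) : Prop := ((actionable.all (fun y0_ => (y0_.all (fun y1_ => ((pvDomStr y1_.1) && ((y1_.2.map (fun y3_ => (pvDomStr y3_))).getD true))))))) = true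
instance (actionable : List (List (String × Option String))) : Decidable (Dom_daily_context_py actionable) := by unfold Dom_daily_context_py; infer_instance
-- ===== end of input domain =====

-- B replaces A's two-phase group-then-summarise with a single streaming pass maintaining
-- per-day running aggregates (alternative decomposition, same asymptotic cost).

-- shared helpers: str(b["day"]).lower() and the truthy b.get("course")
def pvStr (v : Option String) : String := match v with | some s => s | none => "None"

def pvDayKey (b : List (String × Option String)) : String :=
  PySem.Str.lower (pvStr (((PySem.Dict.mk b).get? "day").getD none))

def pvCourse? (b : List (String × Option String)) : Option String :=
  match ((PySem.Dict.mk b).get? "course").join with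
  | some c => if c = "" then none else some c
  | none => none

-- ===== PORT A =====
def daily_context_py (actionable : List (List (String × Option String))) : List (String × List (String × Int)) :=
  let by_day : PySem.Dict String (List (List (String × Option String))) :=
    actionable.foldl (fun d b => d.modify (pvDayKey b) [] (fun v => v ++ [b])) PySem.Dict.empty
  let out : PySem.Dict String (List (String × Int)) :=
    by_day.items.foldl (fun o p =>
      o.insert p.1
        [("count", (p.2.length : Int)),
         ("distinct_courses", PySem.Set.len (PySem.Set.ofList (p.2.filterMap pvCourse?)))])
      PySem.Dict.empty
  out.items

-- ===== PORT B =====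
def pvStepB (p : Int × PySem.Set String) (b : List (String × Option String)) : Int × PySem.Set String :=
  match pvCourse? b with
  | some c => (p.1 + 1, p.2.add c)
  | none => (p.1 + 1, p.2)

def daily_context_py_alt (actionable : List (List (String × Option String))) : List (String × List (String × Int)) :=
  let agg : PySem.Dict String (Int × PySem.Set String) :=
    actionable.foldl (fun d b => d.modify (pvDayKey b) (0, PySem.Set.empty) (fun p => pvStepB p b))
      PySem.Dict.empty
  agg.items.map (fun p => (p.1, [("count", p.2.1), ("distinct_courses", PySem.Set.len p.2.2)]))

-- ===== PRECONDITION & SPEC =====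
-- Pre_ excludes exactly the inputs where a block lacks the "day" key, on which Python A
-- (and Python B alike) raises KeyError.
def Pre_daily_context_py (actionable : List (List (String × Option String))) : Prop :=
  actionable.all (fun b => (PySem.Dict.mk b).contains "day") = true
instance (actionable : List (List (String × Option String))) : Decidable (Pre_daily_context_py actionable) := by unfold Pre_daily_context_py; infer_instance

def pvWitness_daily_context_py : (List (List (String × Option String))) :=
  [[("day", some "Mon"), ("course", some "cs")], [("day", some "MON")], [("day", none), ("course", some "")]]

def Spec_daily_context_py (actionable : List (List (String × Option String))) (out : List (String × List (String × Int))) : Prop := out = daily_context_py_alt actionable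
instance (actionable : List (List (String × Option String))) (out : List (String × List (String × Int))) : Decidable (Spec_daily_context_py actionable out) := by unfold Spec_daily_context_py; infer_instance

-- ===== CLAIM (what is proved, stated in full; the proofs are below) =====
def Claim_equal_daily_context_py : Prop := ∀ (actionable : List (List (String × Option String))), Dom_daily_context_py actionable → Pre_daily_context_py actionable → Spec_daily_context_py actionable (daily_context_py actionable)

-- ===== LEMMAS AND PROOFS =====

-- getD of a keyed modify-fold is the fold of the update over the matching elements
theorem getD_foldl_modify_gen {κ ν β : Type} [BEq κ] [LawfulBEq κ] [DecidableEq κ]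
    (l : List β) (key : β → κ) (f : β → ν → ν) (d0 : ν) (d : PySem.Dict κ ν) (k : κ) :
    (l.foldl (fun d b => d.modify (key b) d0 (f b)) d).getD k d0
      = (l.filter (fun b => key b == k)).foldl (fun v b => f b v) (d.getD k d0) := by
  induction l generalizing d with
  | nil => rfl
  | cons b t ih =>
    simp only [List.foldl_cons, List.filter_cons]
    by_cases h : key b = k
    · simp [h, ih]
    · simp [h, ih, PySem.Dict.getD_modify, Ne.symm h]

theorem foldl_snoc {β : Type} (l : List β) (v0 : List β) :
    l.foldl (fun v b => v ++ [b]) v0 = v0 ++ l := by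
  induction l generalizing v0 with
  | nil => simp
  | cons b t ih => simp [ih]

theorem foldl_stepB (bl : List (List (String × Option String))) (n : Int) (s : PySem.Set String) :
    bl.foldl pvStepB (n, s) = (n + bl.length, PySem.Set.update s (bl.filterMap pvCourse?)) := by
  induction bl generalizing n s with
  | nil => simp [PySem.Set.update]
  | cons b t ih =>
    simp only [List.foldl_cons, List.filterMap_cons]
    cases h : pvCourse? b with
    | none =>
      simp only [pvStepB, h]
      rw [ih]; simp; ring_nf
    | some c =>
      simp only [pvStepB, h]
      rw [ih]; simp [PySem.Set.update]; ring_nf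

theorem daily_context_py_spec : Claim_equal_daily_context_py := by
  intro actionable _ _
  show daily_context_py actionable = daily_context_py_alt actionable
  unfold daily_context_py daily_context_py_alt
  dsimp only
  have hkeysA :
      (actionable.foldl (fun d b => d.modify (pvDayKey b) [] (fun v => v ++ [b]))
        (PySem.Dict.empty : PySem.Dict String (List (List (String × Option String))))).keys
      = PySem.Set.ofList (actionable.map pvDayKey) := by
    rw [PySem.Dict.keys_foldl_modify_key actionable pvDayKey [] (fun _ b v => v ++ [b])]
    rfl
  have hkeysB :
      (actionable.foldl (fun d b => d.modify (pvDayKey b) (0, PySem.Set.empty) (fun p => pvStepB p b))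
        (PySem.Dict.empty : PySem.Dict String (Int × PySem.Set String))).keys
      = PySem.Set.ofList (actionable.map pvDayKey) := by
    rw [PySem.Dict.keys_foldl_modify_key actionable pvDayKey (0, PySem.Set.empty) (fun _ b p => pvStepB p b)]
    rfl
  have hnodup : (PySem.Set.ofList (actionable.map pvDayKey)).Nodup := PySem.Set.nodup_ofList _
  have hndA := hkeysA ▸ hnodup
  have hndB := hkeysB ▸ hnodup
  -- A's second loop inserts fresh distinct keys into an empty dict
  have hfresh := PySem.Dict.items_foldl_insert_fresh
      ((actionable.foldl (fun d b => d.modify (pvDayKey b) [] (fun v => v ++ [b]))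
          (PySem.Dict.empty : PySem.Dict String (List (List (String × Option String))))).items)
      (fun p => p.1)
      (fun p => [("count", (p.2.length : Int)),
        ("distinct_courses", PySem.Set.len (PySem.Set.ofList (p.2.filterMap pvCourse?)))])
      (PySem.Dict.empty : PySem.Dict String (List (String × Int)))
      (fun a _ => rfl)
      (show (((actionable.foldl (fun d b => d.modify (pvDayKey b) [] (fun v => v ++ [b]))
          (PySem.Dict.empty : PySem.Dict String (List (List (String × Option String))))).items).map
            (fun p => p.1)).Nodup from hndA)
  rw [hfresh]
  rw [PySem.Dict.items_eq_map_keys _ hndA []]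
  rw [PySem.Dict.items_eq_map_keys _ hndB (0, PySem.Set.empty)]
  rw [hkeysA, hkeysB]
  rw [show (PySem.Dict.empty : PySem.Dict String (List (String × Int))).items = [] from rfl,
      List.nil_append]
  simp only [List.map_map]
  apply List.map_congr_left
  intro k _
  simp only [Function.comp]
  rw [getD_foldl_modify_gen actionable pvDayKey (fun b v => v ++ [b]) [] PySem.Dict.empty k,
      getD_foldl_modify_gen actionable pvDayKey (fun b p => pvStepB p b) (0, PySem.Set.empty) PySem.Dict.empty k]
  rw [show ((PySem.Dict.empty : PySem.Dict String (List (List (String × Option String)))).getD k []) = [] from rfl,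
      show ((PySem.Dict.empty : PySem.Dict String (Int × PySem.Set String)).getD k (0, PySem.Set.empty)) = (0, PySem.Set.empty) from rfl]
  rw [foldl_snoc, List.nil_append]
  rw [show (List.foldl (fun v b => pvStepB v b) ((0 : Int), PySem.Set.empty)
        (actionable.filter (fun b => pvDayKey b == k))) = _ from foldl_stepB _ 0 PySem.Set.empty]
  simp [PySem.Set.update, PySem.Set.ofList_eq_foldl, PySem.Set.empty]
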